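-- pv_equiv track=rewrite | github.com/jebreimo/Argen | Argen2/argument.py | find_commas
-- ===== SOURCE A (Python) =====
-- def find_commas(text):
--     commas = []
--     pos = 0
--     while True:
--         pos = text.find(",", pos)
--         if pos == -1:
--             break
--         if pos == len(text) - 1 or text[pos + 1] in " \t-/":
--             commas.append(pos)
--         pos += 1
--     return commas
-- ===== SOURCE B (Python) =====
-- def find_commas(text):
--     parts = text.split(",")
--     commas = []
--     pos = -1
--     for part, nxt in zip(parts, parts[1:]):
--         pos += len(part) + 1
--         if pos == len(text) - 1 or nxt[:1] in (" ", "\t", "-", "/"):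
--             commas.append(pos)
--     return commas
-- ===== Notes on version B (the rewrite author's own statement) =====
-- stated objective: alternative
-- what changed: B splits the text on ',' and reconstructs each comma position from cumulative segment lengths while testing the follower character as the head of the next segment, instead of A's while-loop that scans the text with repeated str.find and indexes text[pos+1].
import Mathlib
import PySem

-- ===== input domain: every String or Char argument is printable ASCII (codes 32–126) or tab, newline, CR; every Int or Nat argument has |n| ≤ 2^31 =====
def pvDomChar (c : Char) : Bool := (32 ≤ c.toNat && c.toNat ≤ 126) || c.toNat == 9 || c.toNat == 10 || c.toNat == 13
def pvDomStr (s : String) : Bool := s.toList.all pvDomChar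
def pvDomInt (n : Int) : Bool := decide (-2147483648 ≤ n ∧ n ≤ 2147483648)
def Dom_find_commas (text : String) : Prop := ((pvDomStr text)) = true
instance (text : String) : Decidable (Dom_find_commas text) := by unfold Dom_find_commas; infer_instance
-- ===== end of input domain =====

-- B replaces A's str.find scan over the text by splitting on ',' and reconstructing
-- each comma position from cumulative segment lengths, testing the follower character
-- as the head of the next segment; objective: alternative (same output, same order).

-- shared helper: `text[i] in " \t-/"` guarded by the index being in range
-- (A only consults it when i is in range)
def pvNextOk (cs : List Char) (i : Int) : Bool :=
  match PySem.List.pyGet? cs i with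
  | some c => PySem.Chars.isIn [c] [' ', '\t', '-', '/']
  | none => false

-- bounds fact about str.find(",", pos), cited by the port's termination proof
theorem pv_findFrom_bounds (cs : List Char) (pos : Nat) (hpos : pos ≤ cs.length)
    (hp : PySem.Chars.findFrom cs [','] (pos : Int) none ≠ -1) :
    pos ≤ (PySem.Chars.findFrom cs [','] (pos : Int) none).toNat ∧
    (PySem.Chars.findFrom cs [','] (pos : Int) none).toNat < cs.length := by
  obtain ⟨h1, h2, _⟩ := PySem.Chars.findFrom_natCast_spec cs [','] pos hpos hp
  have hlen := h2.length_le
  simp [List.length_drop] at hlen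
  omega

-- ===== PORT A =====
-- A's while-loop: pos jumps from one found comma to the next via text.find(",", pos)
def findCommasGo (cs : List Char) (pos : Nat) (hpos : pos ≤ cs.length)
    (commas : List Int) : List Int :=
  if hp : PySem.Chars.findFrom cs [','] (pos : Int) none = -1 then
    commas
  else
    let pn := (PySem.Chars.findFrom cs [','] (pos : Int) none).toNat
    have hb := pv_findFrom_bounds cs pos hpos hp
    let commas' :=
      if ((pn : Int) == (cs.length : Int) - 1 || pvNextOk cs ((pn : Int) + 1)) then
        commas ++ [(pn : Int)]
      else commas
    findCommasGo cs (pn + 1) hb.2 commas'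
termination_by cs.length - pos
decreasing_by omega

def find_commas (text : String) : List Int :=
  findCommasGo text.toList 0 (Nat.zero_le _) []

-- ===== PORT B =====
-- B: parts = text.split(","); walk zip(parts, parts[1:]) accumulating the comma
-- position from segment lengths; the char after the comma is nxt[:1]
def find_commas_alt (text : String) : List Int :=
  (((PySem.Chars.splitOn text.toList [',']).zip (PySem.Chars.splitOn text.toList [',']).tail).foldl
    (fun st pq =>
      let pos := st.1 + (pq.1.length : Int) + 1
      if (pos == (text.toList.length : Int) - 1
          || [[' '], ['\t'], ['-'], ['/']].contains (PySem.List.slice pq.2 none (some 1))) then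
        (pos, st.2 ++ [pos])
      else (pos, st.2))
    ((-1 : Int), ([] : List Int))).2

-- ===== PRECONDITION & SPEC =====
def Spec_find_commas (text : String) (out : List Int) : Prop := out = find_commas_alt text
instance (text : String) (out : List Int) : Decidable (Spec_find_commas text out) := by unfold Spec_find_commas; infer_instance

-- ===== CLAIM (what is proved, stated in full; the proofs are below) =====
def Claim_equal_find_commas : Prop := ∀ (text : String), Dom_find_commas text → Spec_find_commas text (find_commas text)

-- ===== LEMMAS AND PROOFS =====

-- the common reference: kept comma positions from index pos onward
def pvCommasFrom (cs : List Char) (pos : Nat) : List Int :=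
  if h : pos < cs.length then
    (if (cs[pos] == ',' && ((pos : Int) == (cs.length : Int) - 1 || pvNextOk cs ((pos : Int) + 1)))
      then [(pos : Int)] else []) ++ pvCommasFrom cs (pos + 1)
  else []
termination_by cs.length - pos

theorem pv_singleton_prefix_drop (cs : List Char) (i : Nat) (c : Char) :
    [c] <+: cs.drop i ↔ cs[i]? = some c := by
  constructor
  · rintro ⟨t, ht⟩
    have : (cs.drop i)[0]? = some c := by rw [← ht]; rfl
    simpa using this
  · intro h
    have hi : i < cs.length := by
      by_contra hc
      simp [List.getElem?_eq_none (by omega : cs.length ≤ i)] at h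
    rw [List.drop_eq_getElem_cons hi]
    exact ⟨cs.drop (i + 1), by simp_all⟩

theorem pvCommasFrom_empty (cs : List Char) (pos : Nat)
    (h : ∀ i, pos ≤ i → cs[i]? ≠ some ',') : pvCommasFrom cs pos = [] := by
  induction pos using pvCommasFrom.induct (cs := cs) with
  | case1 pos hlt ih =>
    rw [pvCommasFrom, dif_pos hlt]
    have hc : cs[pos]? ≠ some ',' := h pos le_rfl
    have hcc : ¬ cs[pos] = ',' := by
      intro he; exact hc (by simp [List.getElem?_eq_getElem hlt, he])
    rw [ih (fun i hi => h i (by omega))]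
    simp [hcc]
  | case2 pos hlt => rw [pvCommasFrom, dif_neg hlt]

theorem pvCommasFrom_skip (cs : List Char) (pos p : Nat) (hle : pos ≤ p)
    (h : ∀ i, pos ≤ i → i < p → cs[i]? ≠ some ',') :
    pvCommasFrom cs pos = pvCommasFrom cs p := by
  induction p with
  | zero =>
    have : pos = 0 := by omega
    rw [this]
  | succ n ih =>
    rcases Nat.lt_or_ge pos (n + 1) with hlt | hge
    · have hpn : pos ≤ n := by omega
      rw [ih hpn (fun i h1 h2 => h i h1 (by omega))]
      by_cases hn : n < cs.length
      · have hnc : ¬ cs[n] = ',' := by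
          intro he
          exact h n hpn (by omega) (by simp [List.getElem?_eq_getElem hn, he])
        rw [pvCommasFrom, dif_pos hn]
        simp [hnc]
      · rw [pvCommasFrom, dif_neg hn, pvCommasFrom,
          dif_neg (by omega : ¬ n + 1 < cs.length)]
    · have : pos = n + 1 := by omega
      rw [this]

theorem findCommasGo_eq (cs : List Char) (pos : Nat) (hpos : pos ≤ cs.length)
    (commas : List Int) :
    findCommasGo cs pos hpos commas = commas ++ pvCommasFrom cs pos := by
  induction pos, hpos, commas using findCommasGo.induct (cs := cs) with
  | case1 pos hpos commas hp =>
    rw [findCommasGo, dif_pos hp]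
    have hno : ¬ [','] <:+: cs.drop pos :=
      (PySem.Chars.findFrom_natCast_eq_neg_one_iff cs [','] pos hpos).mp hp
    have : pvCommasFrom cs pos = [] := by
      apply pvCommasFrom_empty
      intro i hi hc
      apply hno
      have hpre : [','] <+: cs.drop i := (pv_singleton_prefix_drop cs i ',').mpr hc
      have : cs.drop i = (cs.drop pos).drop (i - pos) := by
        rw [List.drop_drop]; congr 1; omega
      rw [this] at hpre
      exact hpre.isInfix.trans (List.drop_suffix _ _).isInfix
    simp [this]
  | case2 pos hpos commas hp pn hb commas' ih =>
    rw [findCommasGo, dif_neg hp]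
    obtain ⟨hs1, hs2, hs3⟩ := PySem.Chars.findFrom_natCast_spec cs [','] pos hpos hp
    have hcomma : cs[pn]? = some ',' := (pv_singleton_prefix_drop cs pn ',').mp hs2
    have hcg : cs[pn] = ',' := by
      have := List.getElem?_eq_getElem hb.2
      rw [this] at hcomma; exact Option.some.inj hcomma
    have hskip : pvCommasFrom cs pos = pvCommasFrom cs pn := by
      apply pvCommasFrom_skip cs pos pn hb.1
      intro i h1 h2 hc
      exact hs3 i (by exact_mod_cast h1) (by omega)
        ((pv_singleton_prefix_drop cs i ',').mpr hc)
    have hunf : pvCommasFrom cs pn =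
        (if ((pn : Int) == (cs.length : Int) - 1 || pvNextOk cs ((pn : Int) + 1))
          then [(pn : Int)] else []) ++ pvCommasFrom cs (pn + 1) := by
      rw [pvCommasFrom, dif_pos hb.2]
      simp [hcg]
    show findCommasGo cs (pn + 1) hb.2 commas' = commas ++ pvCommasFrom cs pos
    rw [ih, hskip, hunf]
    have hc' : commas' =
        if ((pn : Int) == (cs.length : Int) - 1 || pvNextOk cs ((pn : Int) + 1)) then
          commas ++ [(pn : Int)]
        else commas := rfl
    rw [hc']
    by_cases hk : ((pn : Int) == (cs.length : Int) - 1 || pvNextOk cs ((pn : Int) + 1)) = true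
    · simp [hk]
    · simp [hk]

-- ---- B-side machinery ----

-- structural model of text.split(",")
def pvSplit (cs : List Char) (cur : List Char) : List (List Char) :=
  match cs with
  | [] => [cur.reverse]
  | c :: rest => if c = ',' then cur.reverse :: pvSplit rest [] else pvSplit rest (c :: cur)

theorem pvSplit_go (cs : List Char) : ∀ (fuel : Nat) (cur : List Char)
    (acc : List (List Char)), cs.length < fuel →
    PySem.Chars.splitOn.go [','] fuel cs cur acc = acc.reverse ++ pvSplit cs cur := by
  induction cs with
  | nil =>
    intro fuel cur acc hf
    match fuel, hf with
    | fuel + 1, _ => rw [PySem.Chars.splitOn.go.eq_def]; simp [pvSplit]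
  | cons c rest ih =>
    intro fuel cur acc hf
    match fuel, hf with
    | fuel + 1, hf =>
      rw [PySem.Chars.splitOn.go.eq_def]
      simp only []
      by_cases hc : c = ','
      · subst hc
        have hpre : ([','].isPrefixOf (',' :: rest)) = true := by
          simp [List.isPrefixOf]
        simp only [hpre, if_true, List.length_cons, List.length_nil,
          List.drop_succ_cons, List.drop_zero]
        rw [ih fuel [] (cur.reverse :: acc) (by simp at hf; omega)]
        simp [pvSplit]
      · have hpre : ([','].isPrefixOf (c :: rest)) = false := by
          simp [List.isPrefixOf]
          exact fun h => hc h.symm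
        simp only [hpre]
        rw [if_neg (by simp)]
        rw [ih fuel (c :: cur) acc (by simp at hf; omega)]
        simp [pvSplit, hc]

theorem splitOn_eq_pvSplit (cs : List Char) :
    PySem.Chars.splitOn cs [','] = pvSplit cs [] := by
  show PySem.Chars.splitOn.go [','] (cs.length + 1) cs [] [] = _
  rw [pvSplit_go cs (cs.length + 1) [] [] (by omega)]
  rfl

-- the first segment of pvSplit is cur.reverse ++ everything up to the first comma
theorem pvSplit_head (cs : List Char) : ∀ (cur : List Char), ∃ t,
    pvSplit cs cur = (cur.reverse ++ cs.takeWhile (fun c => !(c == ','))) :: t := by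
  induction cs with
  | nil => intro cur; exact ⟨[], by simp [pvSplit]⟩
  | cons c rest ih =>
    intro cur
    by_cases hc : c = ','
    · subst hc
      exact ⟨pvSplit rest [], by simp [pvSplit, List.takeWhile]⟩
    · obtain ⟨t, ht⟩ := ih (c :: cur)
      refine ⟨t, ?_⟩
      have htw : (c :: rest).takeWhile (fun c => !(c == ','))
          = c :: rest.takeWhile (fun c => !(c == ',')) := by
        rw [List.takeWhile_cons, if_pos (by simp [hc])]
      simp [pvSplit, hc, ht, htw]

-- pvB: the pair walk of B, recursively (n = total length, fixed)
def pvB (n : Nat) (parts : List (List Char)) (pos : Int) : List Int :=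
  match parts with
  | [] => []
  | [_] => []
  | p :: q :: rest =>
    (if ((pos + (p.length : Int) + 1) == (n : Int) - 1
        || [[' '], ['\t'], ['-'], ['/']].contains (PySem.List.slice q none (some 1)))
      then [pos + (p.length : Int) + 1] else [])
      ++ pvB n (q :: rest) (pos + (p.length : Int) + 1)

-- unfolding pvB at two leading parts
theorem pvB_cons2 (n : Nat) (p q : List Char) (rest : List (List Char)) (pos : Int) :
    pvB n (p :: q :: rest) pos =
    (if ((pos + (p.length : Int) + 1) == (n : Int) - 1
        || [[' '], ['\t'], ['-'], ['/']].contains (PySem.List.slice q none (some 1)))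
      then [pos + (p.length : Int) + 1] else [])
      ++ pvB n (q :: rest) (pos + (p.length : Int) + 1) := rfl

-- B's fold over zip(parts, parts.tail) is pvB
theorem pvB_foldl (n : Nat) (parts : List (List Char)) :
    ∀ (pos : Int) (commas : List Int),
    ((parts.zip parts.tail).foldl
      (fun st pq =>
        let p := st.1 + ((pq.1.length : Nat) : Int) + 1
        if (p == (n : Int) - 1
            || [[' '], ['\t'], ['-'], ['/']].contains (PySem.List.slice pq.2 none (some 1))) then
          (p, st.2 ++ [p])
        else (p, st.2))
      (pos, commas)).2 = commas ++ pvB n parts pos := by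
  induction parts with
  | nil => intro pos commas; simp [pvB]
  | cons p rest ih =>
    intro pos commas
    match rest with
    | [] => simp [pvB]
    | q :: rs =>
      simp only [List.tail_cons, List.zip_cons_cons, List.foldl_cons]
      rw [show ((q :: rs).zip rs) = ((q :: rs).zip (q :: rs).tail) by rfl]
      by_cases hk : ((pos + (p.length : Int) + 1) == (n : Int) - 1
          || [[' '], ['\t'], ['-'], ['/']].contains (PySem.List.slice q none (some 1))) = true
      · rw [if_pos hk, ih, pvB_cons2, if_pos hk]
        simp
      · rw [if_neg hk, ih, pvB_cons2, if_neg hk]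
        simp

-- head?-of-drop form of pvNextOk
theorem pvNextOk_head (cs : List Char) (j : Nat) :
    pvNextOk cs (j : Int) = (match (cs.drop j).head? with
      | some h => PySem.Chars.isIn [h] [' ', '\t', '-', '/']
      | none => false) := by
  rw [pvNextOk]
  rw [PySem.List.pyGet?_natCast]
  rw [List.head?_drop]

-- singleton infix is membership
theorem pv_singleton_infix (c : Char) (l : List Char) :
    [c] <:+: l ↔ c ∈ l := by
  constructor
  · intro h
    exact h.sublist.subset (List.mem_singleton_self c)
  · intro h
    obtain ⟨s, t, hst⟩ := List.append_of_mem h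
    exact ⟨s, t, by simp [hst]⟩

-- B's tuple membership on nxt[:1] is A's character membership test on the head
theorem pv_contains_eq_isIn (c : Char) :
    ([[' '], ['\t'], ['-'], ['/']].contains [c])
      = PySem.Chars.isIn [c] [' ', '\t', '-', '/'] := by
  have h1 : ([[' '], ['\t'], ['-'], ['/']].contains [c] = true)
      ↔ (c = ' ' ∨ c = '\t' ∨ c = '-' ∨ c = '/') := by
    simp [List.contains_iff_mem]
  have h2 : (PySem.Chars.isIn [c] [' ', '\t', '-', '/'] = true)
      ↔ (c = ' ' ∨ c = '\t' ∨ c = '-' ∨ c = '/') := by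
    rw [PySem.Chars.isIn_iff_infix, pv_singleton_infix]
    simp
  rcases Bool.eq_false_or_eq_true ([[' '], ['\t'], ['-'], ['/']].contains [c]) with h | h <;>
    rcases Bool.eq_false_or_eq_true (PySem.Chars.isIn [c] [' ', '\t', '-', '/']) with h' | h' <;>
    simp_all

-- condition bridge: B's membership on nxt[:1] ↔ the head of the remaining suffix
theorem pv_cond_bridge (rest : List Char) :
    ([[' '], ['\t'], ['-'], ['/']].contains
        (PySem.List.slice (rest.takeWhile (fun c => !(c == ','))) none (some 1)))
      = (match rest.head? with
        | some h => PySem.Chars.isIn [h] [' ', '\t', '-', '/']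
        | none => false) := by
  match rest with
  | [] => simp [PySem.List.slice]
  | c :: rs =>
    by_cases hc : c = ','
    · subst hc
      have ht : ((',' :: rs).takeWhile (fun c => !(c == ','))) = [] := by
        simp [List.takeWhile]
      rw [ht]
      simp only [List.head?_cons]
      decide
    · have ht : ((c :: rs).takeWhile (fun c => !(c == ',')))
          = c :: rs.takeWhile (fun c => !(c == ',')) := by
        simp [List.takeWhile_cons, hc]
      rw [ht]
      have hsl : PySem.List.slice (c :: rs.takeWhile (fun c => !(c == ','))) none (some 1)
          = [c] := by
        rw [PySem.List.slice_to _ (by norm_num : (0:Int) ≤ 1)]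
        simp
      rw [hsl]
      simp only [List.head?_cons]
      exact pv_contains_eq_isIn c

-- main bridge: the pair walk over the split of the suffix equals the reference scan
theorem pvB_eq_pvCommasFrom (cs0 : List Char) (i : Nat) : ∀ (cur : List Char),
    pvB cs0.length (pvSplit (cs0.drop i) cur) ((i : Int) - cur.length - 1)
      = pvCommasFrom cs0 i := by
  induction i using pvCommasFrom.induct (cs := cs0) with
  | case1 i hlt ih =>
    intro cur
    rw [List.drop_eq_getElem_cons hlt]
    by_cases hc : cs0[i] = ','
    · rw [hc]
      rw [show pvSplit (',' :: cs0.drop (i+1)) cur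
            = cur.reverse :: pvSplit (cs0.drop (i+1)) [] by simp [pvSplit]]
      obtain ⟨t, ht⟩ := pvSplit_head (cs0.drop (i+1)) []
      rw [List.reverse_nil, List.nil_append] at ht
      rw [ht]
      rw [pvB]
      have hpos : ((i : Int) - cur.length - 1) + (cur.reverse.length : Int) + 1 = (i : Int) := by
        simp
        omega
      rw [hpos]
      have hcond : ([[' '], ['\t'], ['-'], ['/']].contains
            (PySem.List.slice ((cs0.drop (i+1)).takeWhile (fun c => !(c == ','))) none (some 1)))
          = pvNextOk cs0 ((i : Int) + 1) := by
        rw [pv_cond_bridge]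
        have : ((i : Int) + 1) = (((i + 1 : Nat)) : Int) := by push_cast; ring
        rw [this, pvNextOk_head]
      rw [hcond]
      have htail : pvB cs0.length (((cs0.drop (i+1)).takeWhile (fun c => !(c == ','))) :: t) (i : Int)
          = pvCommasFrom cs0 (i + 1) := by
        rw [← ht]
        have := ih []
        simpa using this
      rw [htail]
      conv_rhs => rw [pvCommasFrom, dif_pos hlt]
      rw [hc]
      simp
    · rw [show pvSplit (cs0[i] :: cs0.drop (i+1)) cur
            = pvSplit (cs0.drop (i+1)) (cs0[i] :: cur) by simp [pvSplit, hc]]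
      have harg : ((i : Int) - cur.length - 1)
          = (((i + 1 : Nat)) : Int) - ((cs0[i] :: cur).length : Int) - 1 := by
        simp
      rw [harg]
      rw [ih (cs0[i] :: cur)]
      conv_rhs => rw [pvCommasFrom, dif_pos hlt]
      simp [hc]
  | case2 i hge =>
    intro cur
    rw [List.drop_eq_nil_of_le (by omega)]
    rw [pvSplit, pvB]
    rw [pvCommasFrom, dif_neg hge]

-- ===== VERDICT (by name: the statement is the Claim_ definition above) =====
theorem find_commas_spec : Claim_equal_find_commas := by
  intro text _
  unfold Spec_find_commas find_commas find_commas_alt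
  rw [findCommasGo_eq, List.nil_append, splitOn_eq_pvSplit,
    pvB_foldl text.toList.length (pvSplit text.toList []) (-1) [], List.nil_append]
  have := pvB_eq_pvCommasFrom text.toList 0 []
  simpa using this.symm
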